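-- pv_equiv track=rewrite | github.com/Uzumaki-Naruto07/Tamkeen-Ai | TamkeenAI_CareerSystem/backend/core/dashboard_data.py | _get_application_funnel
-- ===== SOURCE A (Python) =====
-- from typing import Dict, List, Tuple, Any, Optional, Union
--
-- def _get_application_funnel(job_data: Optional[Dict[str, Any]] = None) -> Dict[str, Any]:
--     """Get application funnel data for dashboard"""
--     funnel = {
--         "applications": 0,
--         "responses": 0,
--         "interviews": 0,
--         "offers": 0,
--         "accepted": 0
--     }
--
--     if not job_data or "applications" not in job_data:
--         return funnel
--
--     applications = job_data.get("applications", [])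
--
--     # Count applications by status
--     funnel["applications"] = len(applications)
--     funnel["responses"] = sum(1 for app in applications if app.get("status") != "applied")
--     funnel["interviews"] = sum(1 for app in applications if app.get("status") in ["interview", "offer", "accepted"])
--     funnel["offers"] = sum(1 for app in applications if app.get("status") in ["offer", "accepted"])
--     funnel["accepted"] = sum(1 for app in applications if app.get("status") == "accepted")
--
--     return funnel
-- ===== SOURCE B (Python) =====
-- from typing import Dict, List, Tuple, Any, Optional, Union
--
-- def _get_application_funnel(job_data: Optional[Dict[str, Any]] = None) -> Dict[str, Any]:
--     """Application funnel derived from a single-pass status tally."""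
--     if not job_data or "applications" not in job_data:
--         return {"applications": 0, "responses": 0, "interviews": 0, "offers": 0, "accepted": 0}
--     applications = job_data["applications"]
--     statuses = [app.get("status") for app in applications]
--     counts = {}
--     for s in statuses:
--         counts[s] = counts.get(s, 0) + 1
--     accepted = counts.get("accepted", 0)
--     offers = accepted + counts.get("offer", 0)
--     interviews = offers + counts.get("interview", 0)
--     return {
--         "applications": len(applications),
--         "responses": len(applications) - counts.get("applied", 0),
--         "interviews": interviews,
--         "offers": offers,
--         "accepted": accepted,
--     }
-- ===== Notes on version B (the rewrite author's own statement) =====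
-- stated objective: simpler
-- what changed: Replaces A's four separate filtering passes over the applications list with one pass that tallies statuses into a dict, then derives all funnel fields arithmetically from the aggregated counts.
import Mathlib
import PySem

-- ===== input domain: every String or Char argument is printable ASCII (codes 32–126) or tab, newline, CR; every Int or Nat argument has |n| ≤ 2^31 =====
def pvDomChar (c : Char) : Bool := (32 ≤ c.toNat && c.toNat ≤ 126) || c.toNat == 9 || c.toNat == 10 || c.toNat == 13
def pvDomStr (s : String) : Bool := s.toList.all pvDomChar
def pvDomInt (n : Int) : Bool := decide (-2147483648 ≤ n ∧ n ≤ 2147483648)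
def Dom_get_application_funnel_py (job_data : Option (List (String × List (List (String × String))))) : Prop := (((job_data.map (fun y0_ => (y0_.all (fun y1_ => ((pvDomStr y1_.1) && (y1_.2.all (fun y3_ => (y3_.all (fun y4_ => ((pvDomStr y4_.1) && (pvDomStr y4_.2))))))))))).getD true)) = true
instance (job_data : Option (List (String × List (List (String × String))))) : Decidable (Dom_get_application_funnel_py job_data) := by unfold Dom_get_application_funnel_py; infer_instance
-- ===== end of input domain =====

-- ===== PORT A =====
-- A: builds the zeroed funnel, then four separate counting passes over the applications.
def get_application_funnel_py (job_data : Option (List (String × List (List (String × String))))) : List (String × Int) :=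
  let funnel : List (String × Int) :=
    [("applications", 0), ("responses", 0), ("interviews", 0), ("offers", 0), ("accepted", 0)]
  match job_data with
  | none => funnel
  | some jd =>
    if jd = [] ∨ PySem.Dict.get? (PySem.Dict.mk jd) "applications" = none then funnel
    else
      let apps := PySem.Dict.getD (PySem.Dict.mk jd) "applications" []
      [("applications", (apps.length : Int)),
       ("responses", apps.foldl (fun acc app =>
          if PySem.Dict.get? (PySem.Dict.mk app) "status" ≠ some "applied" then acc + 1 else acc) 0),
       ("interviews", apps.foldl (fun acc app =>
          if PySem.Dict.get? (PySem.Dict.mk app) "status" = some "interview" ∨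
             PySem.Dict.get? (PySem.Dict.mk app) "status" = some "offer" ∨
             PySem.Dict.get? (PySem.Dict.mk app) "status" = some "accepted" then acc + 1 else acc) 0),
       ("offers", apps.foldl (fun acc app =>
          if PySem.Dict.get? (PySem.Dict.mk app) "status" = some "offer" ∨
             PySem.Dict.get? (PySem.Dict.mk app) "status" = some "accepted" then acc + 1 else acc) 0),
       ("accepted", apps.foldl (fun acc app =>
          if PySem.Dict.get? (PySem.Dict.mk app) "status" = some "accepted" then acc + 1 else acc) 0)]

-- ===== PORT B =====
-- B: one pass tallies statuses into a dict; every funnel field is derived from the tally.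
def get_application_funnel_py_alt (job_data : Option (List (String × List (List (String × String))))) : List (String × Int) :=
  match job_data with
  | none => [("applications", 0), ("responses", 0), ("interviews", 0), ("offers", 0), ("accepted", 0)]
  | some jd =>
    if jd = [] ∨ PySem.Dict.get? (PySem.Dict.mk jd) "applications" = none then
      [("applications", 0), ("responses", 0), ("interviews", 0), ("offers", 0), ("accepted", 0)]
    else
      let apps := PySem.Dict.getD (PySem.Dict.mk jd) "applications" []
      let statuses := apps.map (fun app => PySem.Dict.get? (PySem.Dict.mk app) "status")
      let counts : PySem.Dict (Option String) Int :=
        statuses.foldl (fun d s => d.insert s (d.getD s 0 + 1)) PySem.Dict.empty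
      let accepted := counts.getD (some "accepted") 0
      let offers := accepted + counts.getD (some "offer") 0
      let interviews := offers + counts.getD (some "interview") 0
      [("applications", (apps.length : Int)),
       ("responses", (apps.length : Int) - counts.getD (some "applied") 0),
       ("interviews", interviews),
       ("offers", offers),
       ("accepted", accepted)]

-- ===== PRECONDITION & SPEC =====
def Spec_get_application_funnel_py (job_data : Option (List (String × List (List (String × String))))) (out : List (String × Int)) : Prop := out = get_application_funnel_py_alt job_data
instance (job_data : Option (List (String × List (List (String × String))))) (out : List (String × Int)) : Decidable (Spec_get_application_funnel_py job_data out) := by unfold Spec_get_application_funnel_py; infer_instance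

-- ===== CLAIM (what is proved, stated in full; the proofs are below) =====
def Claim_equal_get_application_funnel_py : Prop := ∀ (job_data : Option (List (String × List (List (String × String))))), Dom_get_application_funnel_py job_data → Spec_get_application_funnel_py job_data (get_application_funnel_py job_data)

-- ===== LEMMAS AND PROOFS =====

theorem countP_eq_count (l : List (Option String)) (v : Option String) :
    l.countP (fun x => decide (x = v)) = l.count v := by
  rw [List.count_eq_countP]
  exact List.countP_congr (fun x _ => by simp)

-- a tallied value of the status map, as a countP over the applications themselves
theorem count_map_key (apps : List (List (String × String))) (v : Option String) :
    (apps.map (fun app => PySem.Dict.get? (PySem.Dict.mk app) "status")).count v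
      = apps.countP (fun app => decide (PySem.Dict.get? (PySem.Dict.mk app) "status" = v)) := by
  rw [← countP_eq_count, List.countP_map]; rfl

theorem countP_or_two (l : List (List (String × String))) (u v : Option String) (huv : u ≠ v) :
    l.countP (fun app => decide (PySem.Dict.get? (PySem.Dict.mk app) "status" = u ∨
        PySem.Dict.get? (PySem.Dict.mk app) "status" = v))
      = l.countP (fun app => decide (PySem.Dict.get? (PySem.Dict.mk app) "status" = u))
        + l.countP (fun app => decide (PySem.Dict.get? (PySem.Dict.mk app) "status" = v)) := by
  induction l with
  | nil => rfl
  | cons h t ih =>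
    by_cases hu : PySem.Dict.get? (PySem.Dict.mk h) "status" = u <;>
      by_cases hv : PySem.Dict.get? (PySem.Dict.mk h) "status" = v <;>
      simp_all <;> omega

theorem countP_or_three (l : List (List (String × String))) (u v w : Option String)
    (huv : u ≠ v) (huw : u ≠ w) (hvw : v ≠ w) :
    l.countP (fun app => decide (PySem.Dict.get? (PySem.Dict.mk app) "status" = u ∨
        PySem.Dict.get? (PySem.Dict.mk app) "status" = v ∨
        PySem.Dict.get? (PySem.Dict.mk app) "status" = w))
      = l.countP (fun app => decide (PySem.Dict.get? (PySem.Dict.mk app) "status" = u))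
        + l.countP (fun app => decide (PySem.Dict.get? (PySem.Dict.mk app) "status" = v))
        + l.countP (fun app => decide (PySem.Dict.get? (PySem.Dict.mk app) "status" = w)) := by
  induction l with
  | nil => rfl
  | cons h t ih =>
    by_cases hu : PySem.Dict.get? (PySem.Dict.mk h) "status" = u <;>
      by_cases hv : PySem.Dict.get? (PySem.Dict.mk h) "status" = v <;>
      by_cases hw : PySem.Dict.get? (PySem.Dict.mk h) "status" = w <;>
      simp_all <;> omega

theorem countP_ne_key (l : List (List (String × String))) (v : Option String) :
    l.countP (fun app => decide (PySem.Dict.get? (PySem.Dict.mk app) "status" ≠ v))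
      + l.countP (fun app => decide (PySem.Dict.get? (PySem.Dict.mk app) "status" = v))
      = l.length := by
  induction l with
  | nil => rfl
  | cons h t ih =>
    by_cases hv : PySem.Dict.get? (PySem.Dict.mk h) "status" = v <;>
      simp_all <;> omega

-- ===== VERDICT (by name: the statement is the Claim_ definition above) =====
theorem get_application_funnel_py_spec : Claim_equal_get_application_funnel_py := by
  intro job_data _
  unfold Spec_get_application_funnel_py get_application_funnel_py get_application_funnel_py_alt
  match job_data with
  | none => rfl
  | some jd =>
    simp only
    split
    · rfl
    · simp only [PySem.List.foldl_ite_add_one, PySem.Dict.getD_foldl_insert_add_one,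
        PySem.Dict.getD_empty, zero_add, count_map_key, List.cons.injEq, Prod.mk.injEq,
        true_and, and_true]
      refine ⟨?_, ?_, ?_⟩
      · have h := countP_ne_key (PySem.Dict.getD (PySem.Dict.mk jd) "applications" []) (some "applied")
        have hlen : (PySem.Dict.getD (PySem.Dict.mk jd) "applications" []).countP
            (fun app => decide (PySem.Dict.get? (PySem.Dict.mk app) "status" = some "applied"))
            ≤ (PySem.Dict.getD (PySem.Dict.mk jd) "applications" []).length := List.countP_le_length
        omega
      · rw [countP_or_three _ (some "interview") (some "offer") (some "accepted")
          (by simp) (by simp) (by simp)]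
        push_cast; ring
      · rw [countP_or_two _ (some "offer") (some "accepted") (by simp)]
        push_cast; ring
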